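-- pv_equiv track=rewrite | github.com/Berlyli866/CS1301 | HW04/HW04.py | compoundWords
-- ===== SOURCE A (Python) =====
-- def compoundWords(wordsList,num):
--     if wordsList !=[]:
--         l=[j for i,j in enumerate(wordsList) if num ==len(j)]
--         if l ==[]:
--             count=0
--             W=[]
--             for i in range(len(wordsList)):
--                 a=wordsList[i]
--                 count +=1
--                 for j in range(count,len(wordsList)):
--                     b=wordsList[j]
--                     L=len(a)+len(b)
--                     if L==num:
--                         new=str(a)+str(b)
--                         W.append(new)
--         else:
--             W=l
--     else:
--         W=None
--     return W
-- ===== SOURCE B (Python) =====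
-- def compoundWords(wordsList, num):
--     # One backward pass with a length-indexed dictionary instead of A's
--     # quadratic nested index loops.
--     if not wordsList:
--         return None
--     exact = [w for w in wordsList if len(w) == num]
--     if exact:
--         return exact
--     suffix = {}          # length -> words seen so far (i.e. to the right), rightmost last
--     rows = []            # per-index result rows, collected back-to-front
--     for a in reversed(wordsList):
--         bucket = suffix.get(num - len(a), [])
--         rows.append([a + b for b in reversed(bucket)])
--         suffix.setdefault(len(a), []).append(a)
--     W = []
--     for row in reversed(rows):
--         W += row
--     return W
-- ===== Notes on version B (the rewrite author's own statement) =====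
-- stated objective: faster
-- what changed: Replaces A's quadratic nested index loops over all pairs by a single backward pass that keeps a dictionary from word length to the words already seen, reading off each word's partners by one lookup.
import Mathlib
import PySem

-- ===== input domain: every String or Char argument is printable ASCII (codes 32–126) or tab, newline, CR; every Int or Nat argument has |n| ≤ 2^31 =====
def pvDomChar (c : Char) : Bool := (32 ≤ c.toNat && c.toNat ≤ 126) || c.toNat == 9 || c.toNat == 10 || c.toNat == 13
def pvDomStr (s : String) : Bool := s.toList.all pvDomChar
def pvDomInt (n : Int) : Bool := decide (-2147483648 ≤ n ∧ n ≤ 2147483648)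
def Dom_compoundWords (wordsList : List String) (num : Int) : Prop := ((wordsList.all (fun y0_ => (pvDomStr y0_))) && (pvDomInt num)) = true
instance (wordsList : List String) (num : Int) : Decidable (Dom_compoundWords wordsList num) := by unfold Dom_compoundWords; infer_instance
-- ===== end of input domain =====

-- B replaces A's quadratic nested index loops by one backward pass that keeps a
-- length-indexed dictionary of the words already seen (objective: faster).

-- ===== PORT A =====
def compoundWords (wordsList : List String) (num : Int) : Option (List String) :=
  if wordsList ≠ [] then
    -- l=[j for i,j in enumerate(wordsList) if num == len(j)]
    let l := (PySem.List.enumerate wordsList).foldl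
      (fun acc ij => if num == PySem.Str.len ij.2 then acc ++ [ij.2] else acc) []
    if l = [] then
      let st := (PySem.List.pyRange 0 (wordsList.length : Int) 1).foldl
        (fun (st : Int × List String) i =>
          let a := PySem.List.pyGetD wordsList i ""
          let count := st.1 + 1
          let W := (PySem.List.pyRange count (wordsList.length : Int) 1).foldl
            (fun W j =>
              let b := PySem.List.pyGetD wordsList j ""
              let L := PySem.Str.len a + PySem.Str.len b
              if L == num then W ++ [a ++ b] else W) st.2
          (count, W))
        ((0 : Int), ([] : List String))
      some st.2
    else some l
  else none

-- ===== PORT B =====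
def compoundWords_alt (wordsList : List String) (num : Int) : Option (List String) :=
  if wordsList = [] then none
  else
    let exact := wordsList.filter (fun w => PySem.Str.len w == num)
    if exact ≠ [] then some exact
    else
      let st := wordsList.reverse.foldl
        (fun (st : PySem.Dict Int (List String) × List (List String)) a =>
          let bucket := st.1.getD (num - PySem.Str.len a) []
          let row := bucket.reverse.map (fun b => a ++ b)
          (st.1.modify (PySem.Str.len a) [] (fun l => l ++ [a]), st.2 ++ [row]))
        ((PySem.Dict.empty : PySem.Dict Int (List String)), ([] : List (List String)))
      some (st.2.reverse.foldl (fun W row => W ++ row) [])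

-- ===== PRECONDITION & SPEC =====
def Spec_compoundWords (wordsList : List String) (num : Int) (out : Option (List String)) : Prop := out = compoundWords_alt wordsList num
instance (wordsList : List String) (num : Int) (out : Option (List String)) : Decidable (Spec_compoundWords wordsList num out) := by unfold Spec_compoundWords; infer_instance

-- ===== CLAIM (what is proved, stated in full; the proofs are below) =====
def Claim_equal_compoundWords : Prop := ∀ (wordsList : List String) (num : Int), Dom_compoundWords wordsList num → Spec_compoundWords wordsList num (compoundWords wordsList num)

-- ===== LEMMAS AND PROOFS =====

-- the list of concatenations a++b over index pairs i<j with len a + len b = num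
def pvPairs (num : Int) : List String → List String
  | [] => []
  | a :: rest =>
      (rest.filter (fun b => PySem.Str.len a + PySem.Str.len b == num)).map (fun b => a ++ b)
        ++ pvPairs num rest

lemma pvBeqComm (a b : Int) : (a == b) = (b == a) := by
  rw [Bool.eq_iff_iff]; simp only [beq_iff_eq]; exact eq_comm

lemma pvPredEq (num la : Int) (b : String) :
    (PySem.Str.len b == num - la) = (la + PySem.Str.len b == num) := by
  rw [Bool.eq_iff_iff]; simp only [beq_iff_eq]; omega

-- A's inner loop over j ∈ range(c, n) appends the row for word a
lemma pvInnerA (ws : List String) (num : Int) (a : String) (c : Int) (W : List String)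
    (hc : 0 ≤ c) :
    (PySem.List.pyRange c (ws.length : Int) 1).foldl
      (fun W j =>
        let b := PySem.List.pyGetD ws j ""
        let L := PySem.Str.len a + PySem.Str.len b
        if L == num then W ++ [a ++ b] else W) W
      = W ++ ((ws.drop c.toNat).filter
          (fun b => PySem.Str.len a + PySem.Str.len b == num)).map (fun b => a ++ b) := by
  rw [PySem.List.foldl_pyRange_pyGetD' ws ""
        (fun W b => if PySem.Str.len a + PySem.Str.len b == num then W ++ [a ++ b] else W) W hc]
  exact PySem.List.foldl_append_if _ _ _ _

-- A's outer loop starting at index c with state (c, W)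
lemma pvOuterA (ws : List String) (num : Int) :
    ∀ (k : Nat) (c : Int) (W : List String), 0 ≤ c → k = (((ws.length : Int)) - c).toNat →
    ((PySem.List.pyRange c (ws.length : Int) 1).foldl
      (fun (st : Int × List String) i =>
        let a := PySem.List.pyGetD ws i ""
        let count := st.1 + 1
        let W := (PySem.List.pyRange count (ws.length : Int) 1).foldl
          (fun W j =>
            let b := PySem.List.pyGetD ws j ""
            let L := PySem.Str.len a + PySem.Str.len b
            if L == num then W ++ [a ++ b] else W) st.2
        (count, W))
      (c, W)).2 = W ++ pvPairs num (ws.drop c.toNat) := by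
  intro k
  induction k with
  | zero =>
    intro c W hc hk
    have hlen : (ws.length : Int) ≤ c := by omega
    rw [PySem.List.pyRange_one_eq_nil hlen]
    have hdrop : ws.drop c.toNat = [] := List.drop_eq_nil_of_le (by omega)
    simp [hdrop, pvPairs]
  | succ k ih =>
    intro c W hc hk
    have hlt : c < (ws.length : Int) := by omega
    rw [PySem.List.pyRange_one_cons hlt]
    simp only [List.foldl_cons]
    rw [pvInnerA ws num _ (c + 1) W (by omega)]
    rw [ih (c + 1) _ (by omega) (by omega)]
    have hcn : c.toNat < ws.length := by omega
    have hget : PySem.List.pyGetD ws c "" = ws[c.toNat] :=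
      PySem.List.pyGetD_eq_getElem ws "" hc hlt
    have hdrop : ws.drop c.toNat = ws[c.toNat] :: ws.drop (c.toNat + 1) :=
      List.drop_eq_getElem_cons hcn
    have htn : (c + 1).toNat = c.toNat + 1 := by omega
    rw [htn, hdrop, hget]
    simp [pvPairs, List.append_assoc]

-- B's combined fold characterised
lemma pvFoldB (num : Int) (ws : List String) :
    (∀ (L : Int),
      (ws.foldr (fun a (st : PySem.Dict Int (List String) × List (List String)) =>
          (st.1.modify (PySem.Str.len a) [] (fun l => l ++ [a]),
           st.2 ++ [((st.1.getD (num - PySem.Str.len a) []).reverse).map (fun b => a ++ b)]))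
        (PySem.Dict.empty, [])).1.getD L []
        = (ws.filter (fun b => PySem.Str.len b == L)).reverse) ∧
    ((ws.foldr (fun a (st : PySem.Dict Int (List String) × List (List String)) =>
          (st.1.modify (PySem.Str.len a) [] (fun l => l ++ [a]),
           st.2 ++ [((st.1.getD (num - PySem.Str.len a) []).reverse).map (fun b => a ++ b)]))
        (PySem.Dict.empty, [])).2.reverse.flatten
        = pvPairs num ws) := by
  induction ws with
  | nil =>
    refine ⟨?_, ?_⟩
    · intro L; simp [PySem.Dict.getD_empty]
    · simp [pvPairs]
  | cons a rest ih =>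
    obtain ⟨ih1, ih2⟩ := ih
    constructor
    · intro L
      simp only [List.foldr_cons, PySem.Dict.getD_modify]
      by_cases h : L = PySem.Str.len a
      · rw [if_pos h, ih1]
        subst h
        simp
      · rw [if_neg h, ih1]
        simp [List.filter_cons]
        exact fun hh => h (by simpa using hh.symm)
    · simp only [List.foldr_cons, List.reverse_append, List.reverse_cons]
      simp only [List.reverse_nil, List.nil_append, List.singleton_append, List.flatten_cons]
      rw [ih2, ih1, List.reverse_reverse]
      have : (rest.filter (fun b => PySem.Str.len b == num - PySem.Str.len a))
           = rest.filter (fun b => PySem.Str.len a + PySem.Str.len b == num) := by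
        apply List.filter_congr; intro b _; exact pvPredEq num (PySem.Str.len a) b
      rw [this]; rfl

-- A's comprehension over enumerate is B's filter
lemma pvEnumFilterMap (num : Int) (ws : List String) : ∀ (s : Int),
    ((PySem.List.enumerate ws s).filter (fun ij => num == PySem.Str.len ij.2)).map
      (fun ij => ij.2)
      = ws.filter (fun w => PySem.Str.len w == num) := by
  induction ws with
  | nil => intro s; simp [PySem.List.enumerate_nil]
  | cons a rest ih =>
    intro s
    rw [PySem.List.enumerate_cons, List.filter_cons, List.filter_cons,
        pvBeqComm num (PySem.Str.len a)]
    by_cases h : (PySem.Str.len a == num) = true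
    · rw [if_pos h, if_pos h, List.map_cons, ih (s + 1)]
    · rw [if_neg h, if_neg h, ih (s + 1)]

lemma pvExactEq (ws : List String) (num : Int) :
    (PySem.List.enumerate ws).foldl
      (fun acc ij => if num == PySem.Str.len ij.2 then acc ++ [ij.2] else acc) []
      = ws.filter (fun w => PySem.Str.len w == num) := by
  have h1 : (PySem.List.enumerate ws).foldl
      (fun acc ij => if num == PySem.Str.len ij.2 then acc ++ [ij.2] else acc) []
      = [] ++ ((PySem.List.enumerate ws).filter
          (fun ij => num == PySem.Str.len ij.2)).map (fun ij => ij.2) :=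
    PySem.List.foldl_append_if _ _ _ _
  rw [h1]
  simpa using pvEnumFilterMap num ws 0

lemma pvFlattenFold (rows : List (List String)) (acc : List String) :
    rows.foldl (fun W row => W ++ row) acc = acc ++ rows.flatten := by
  induction rows generalizing acc with
  | nil => simp
  | cons r t ih => simp [List.foldl_cons, ih, List.append_assoc]

-- ===== VERDICT (by name: the statement is the Claim_ definition above) =====
theorem compoundWords_spec : Claim_equal_compoundWords := by
  intro ws num _
  unfold Spec_compoundWords
  by_cases hnil : ws = []
  · simp [compoundWords, compoundWords_alt, hnil]
  · simp only [compoundWords, compoundWords_alt]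
    rw [if_pos hnil, if_neg hnil, pvExactEq ws num]
    by_cases hF : ws.filter (fun w => PySem.Str.len w == num) = []
    · rw [if_pos hF, if_neg (not_not_intro hF)]
      refine congrArg some ?_
      rw [pvOuterA ws num (((ws.length : Int)) - 0).toNat 0 [] le_rfl rfl]
      rw [pvFlattenFold]
      simp only [List.foldl_reverse]
      rw [(pvFoldB num ws).2]
      simp
    · rw [if_neg hF, if_pos hF]
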